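-- pv_equiv track=rewrite | github.com/Nepomuceno/adventofcode2023 | day_12/solution.py | is_valid_solution
-- ===== SOURCE A (Python) =====
-- def is_valid_solution(item: tuple[str, list[int]]):
--     contigous_sharps = []
--     contigous = 0
--     for i in range(len(item[0])):
--         if item[0][i] == "#":
--             contigous += 1
--         else:
--             if contigous > 0:
--                 contigous_sharps.append(contigous)
--             contigous = 0
--     if contigous > 0:
--         contigous_sharps.append(contigous)
--     expected = item[1]
--     if len(expected) != len(contigous_sharps):
--         return False
--     for i in range(len(expected)):
--         if expected[i] != contigous_sharps[i]:
--             return False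
--     return True
-- ===== SOURCE B (Python) =====
-- import re
--
-- def is_valid_solution(item: tuple[str, list[int]]):
--     runs = [len(m) for m in re.findall(r"#+", item[0])]
--     return runs == list(item[1])
-- ===== Notes on version B (the rewrite author's own statement) =====
-- stated objective: idiomatic
-- what changed: Replaces the manual counter/flush state-machine scan and the index-by-index comparison loop with a regex extraction of the '#'-runs compared as whole lists.
import Mathlib
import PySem

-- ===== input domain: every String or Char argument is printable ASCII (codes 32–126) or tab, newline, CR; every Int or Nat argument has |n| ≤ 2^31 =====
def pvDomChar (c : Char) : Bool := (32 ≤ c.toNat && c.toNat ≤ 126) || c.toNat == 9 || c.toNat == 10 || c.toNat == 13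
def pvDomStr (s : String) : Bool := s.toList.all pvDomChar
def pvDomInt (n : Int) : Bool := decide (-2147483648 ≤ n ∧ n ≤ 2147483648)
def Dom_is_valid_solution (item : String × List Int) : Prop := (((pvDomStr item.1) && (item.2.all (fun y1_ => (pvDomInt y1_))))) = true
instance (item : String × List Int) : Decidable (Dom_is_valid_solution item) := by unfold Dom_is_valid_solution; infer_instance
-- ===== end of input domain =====

-- B replaces A's manual counter/flush scan and index-compare loop by regex-style run
-- extraction compared as whole lists (idiomatic; same O(n) cost).

-- ===== PORT A =====
-- the for-loop over the characters, carrying (contigous_sharps, contigous)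
def pvStepA (p : List Int × Int) (c : Char) : List Int × Int :=
  if c = '#' then (p.1, p.2 + 1)
  else (if p.2 > 0 then p.1 ++ [p.2] else p.1, 0)

def is_valid_solution (item : String × List Int) : Bool :=
  let st := item.1.toList.foldl pvStepA ([], 0)
  let contigous_sharps := if st.2 > 0 then st.1 ++ [st.2] else st.1
  let expected := item.2
  if expected.length ≠ contigous_sharps.length then false
  else (List.range expected.length).all
    (fun i => decide (expected.getD i 0 = contigous_sharps.getD i 0))

-- ===== PORT B =====
-- re.findall(r"#+", s) mapped to lengths: extract each maximal run of '#'
def pvRunsB (l : List Char) : List Int :=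
  match l with
  | [] => []
  | c :: rest =>
    if c = '#' then
      ((rest.takeWhile (· = '#')).length + 1 : Int) :: pvRunsB (rest.dropWhile (· = '#'))
    else pvRunsB rest
termination_by l.length
decreasing_by
  · exact Nat.lt_succ_of_le (List.length_dropWhile_le _ _)
  · simp

def is_valid_solution_alt (item : String × List Int) : Bool :=
  pvRunsB item.1.toList == item.2

-- ===== PRECONDITION & SPEC =====
def Spec_is_valid_solution (item : String × List Int) (out : Bool) : Prop := out = is_valid_solution_alt item
instance (item : String × List Int) (out : Bool) : Decidable (Spec_is_valid_solution item out) := by unfold Spec_is_valid_solution; infer_instance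

-- ===== CLAIM (what is proved, stated in full; the proofs are below) =====
def Claim_equal_is_valid_solution : Prop := ∀ (item : String × List Int), Dom_is_valid_solution item → Spec_is_valid_solution item (is_valid_solution item)

-- ===== LEMMAS AND PROOFS =====

-- runs with a pending counter k of '#' already seen
def pvPend (k : Int) : List Char → List Int
  | [] => if k > 0 then [k] else []
  | c :: rest =>
    if c = '#' then pvPend (k + 1) rest
    else if k > 0 then k :: pvPend 0 rest else pvPend 0 rest

theorem pend_fold (l : List Char) : ∀ (acc : List Int) (k : Int),
    (let st := l.foldl pvStepA (acc, k);
     if st.2 > 0 then st.1 ++ [st.2] else st.1) = acc ++ pvPend k l := by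
  induction l with
  | nil => intro acc k; simp [pvPend]; split <;> simp
  | cons c rest ih =>
    intro acc k
    simp only [List.foldl_cons, pvStepA, pvPend]
    by_cases hc : c = '#'
    · simp [hc, ih]
    · simp only [hc, if_false]
      by_cases hk : k > 0
      · simp [hk, ih]
      · simp [hk, ih]

theorem runsB_nil : pvRunsB [] = [] := by rw [pvRunsB.eq_def]

theorem runsB_hash (rest : List Char) :
    pvRunsB ('#' :: rest) =
      ((rest.takeWhile (· = '#')).length + 1 : Int) :: pvRunsB (rest.dropWhile (· = '#')) := by
  rw [pvRunsB.eq_def]; simp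

theorem runsB_ne (c : Char) (rest : List Char) (h : ¬ c = '#') :
    pvRunsB (c :: rest) = pvRunsB rest := by
  rw [pvRunsB.eq_def]; simp [h]

theorem pend_runs (l : List Char) :
    pvPend 0 l = pvRunsB l ∧
    ∀ k : Int, 0 < k →
      pvPend k l = (k + (l.takeWhile (· = '#')).length : Int) :: pvRunsB (l.dropWhile (· = '#')) := by
  induction l with
  | nil =>
    refine ⟨by simp [pvPend, runsB_nil], ?_⟩
    intro k hk; simp [pvPend, runsB_nil, hk]
  | cons c rest ih =>
    constructor
    · by_cases hc : c = '#'
      · subst hc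
        simp only [pvPend, if_true, runsB_hash]
        have h1 : (0 : Int) + 1 = 1 := by norm_num
        rw [h1, ih.2 1 (by norm_num)]
        norm_num [add_comm]
      · simp [pvPend, hc, runsB_ne c rest hc, ih.1]
    · intro k hk
      by_cases hc : c = '#'
      · subst hc
        simp only [pvPend, if_true]
        rw [ih.2 (k + 1) (by omega)]
        simp [List.takeWhile, List.dropWhile]
        omega
      · simp [pvPend, hc, hk, runsB_ne c rest hc, ih.1, List.takeWhile, List.dropWhile]

theorem beq_swap (xs ys : List Int) : (xs == ys) = (ys == xs) := by
  by_cases h : xs = ys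
  · simp [h]
  · rw [beq_eq_false_iff_ne.mpr h, Eq.symm (beq_eq_false_iff_ne.mpr (Ne.symm h))]

-- the index loop with equal lengths is list equality
theorem range_all_eq (xs ys : List Int) (h : xs.length = ys.length) :
    ((List.range xs.length).all (fun i => decide (xs.getD i 0 = ys.getD i 0))) = (xs == ys) := by
  rcases Bool.eq_false_or_eq_true ((List.range xs.length).all
      (fun i => decide (xs.getD i 0 = ys.getD i 0))) with ha | ha
  swap
  · rw [ha]
    symm
    rw [beq_eq_false_iff_ne]
    intro he; subst he
    simp at ha
  · rw [ha]
    symm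
    rw [beq_iff_eq]
    simp only [List.all_eq_true, List.mem_range, decide_eq_true_eq] at ha
    apply List.ext_getElem h
    intro i h1 h2
    have := ha i h1
    rwa [List.getD_eq_getElem xs 0 h1, List.getD_eq_getElem ys 0 h2] at this

-- ===== VERDICT (by name: the statement is the Claim_ definition above) =====
theorem is_valid_solution_spec : Claim_equal_is_valid_solution := by
  intro item _
  unfold Spec_is_valid_solution is_valid_solution is_valid_solution_alt
  have hfold := pend_fold item.1.toList [] 0
  simp only [List.nil_append] at hfold
  simp only [hfold, (pend_runs item.1.toList).1]
  by_cases hl : item.2.length = (pvRunsB item.1.toList).length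
  · rw [if_neg (by simp [hl])]
    rw [range_all_eq item.2 (pvRunsB item.1.toList) hl, beq_swap]
  · rw [if_pos hl]
    symm
    rw [beq_eq_false_iff_ne]
    intro h; exact hl (by rw [h])
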